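-- pv_equiv track=rewrite | github.com/bashbash96/InterviewPreparation | LeetCode/googleOA.py | mergeArrs
-- ===== SOURCE A (Python) =====
-- def mergeArrs(S, E):
--     res = []
--     for num in S:
--         res.append((num, 1))  # 1 for arrival
--     for num in E:
--         res.append((num, 0))  # 0 for leaving
--     res = sorted(res, key=lambda pair: (pair[0], pair[1]))
--     return res
-- ===== SOURCE B (Python) =====
-- def mergeArrs(S, E):
--     s = sorted(S)
--     e = sorted(E)
--     res = []
--     i = j = 0
--     while i < len(s) and j < len(e):
--         if e[j] <= s[i]:
--             res.append((e[j], 0))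
--             j += 1
--         else:
--             res.append((s[i], 1))
--             i += 1
--     while i < len(s):
--         res.append((s[i], 1))
--         i += 1
--     while j < len(e):
--         res.append((e[j], 0))
--         j += 1
--     return res
-- ===== Notes on version B (the rewrite author's own statement) =====
-- stated objective: alternative
-- what changed: Instead of tagging everything into one list and sorting the pairs by (value, tag), B sorts S and E separately and does a two-pointer merge, emitting E elements (tag 0) before S elements (tag 1) on equal values.
import Mathlib
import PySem

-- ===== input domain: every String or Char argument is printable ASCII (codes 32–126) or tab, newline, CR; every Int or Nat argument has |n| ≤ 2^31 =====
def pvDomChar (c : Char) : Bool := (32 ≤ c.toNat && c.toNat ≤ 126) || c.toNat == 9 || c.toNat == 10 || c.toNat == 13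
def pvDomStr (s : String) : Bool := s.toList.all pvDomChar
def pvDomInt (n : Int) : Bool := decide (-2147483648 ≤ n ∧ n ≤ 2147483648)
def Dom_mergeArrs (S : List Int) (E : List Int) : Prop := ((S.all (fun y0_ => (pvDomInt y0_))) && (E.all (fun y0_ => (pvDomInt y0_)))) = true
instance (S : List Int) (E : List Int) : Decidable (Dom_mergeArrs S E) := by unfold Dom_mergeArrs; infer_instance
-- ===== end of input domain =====

-- B sorts S and E separately and two-pointer merges them (E before S on ties); A tags first and sorts the pair list.

-- ===== PORT A =====
def mergeArrs (S : List Int) (E : List Int) : List (Int × Int) :=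
  let res : List (Int × Int) := []
  let res := S.foldl (fun acc num => acc ++ [(num, 1)]) res
  let res := E.foldl (fun acc num => acc ++ [(num, 0)]) res
  PySem.List.sorted2 res (fun pair => pair.1) (fun pair => pair.2)

-- ===== PORT B =====
-- the two-pointer merge loop of Source B, as structural recursion on the two sorted lists
def mergeTag : List Int → List Int → List (Int × Int)
  | s :: ss, e :: ee =>
      if e ≤ s then (e, 0) :: mergeTag (s :: ss) ee
      else (s, 1) :: mergeTag ss (e :: ee)
  | ss, [] => ss.map (fun v => (v, 1))
  | [], ee => ee.map (fun v => (v, 0))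

def mergeArrs_alt (S : List Int) (E : List Int) : List (Int × Int) :=
  mergeTag (PySem.List.sorted S (fun x => x)) (PySem.List.sorted E (fun x => x))

-- ===== PRECONDITION & SPEC =====
def Spec_mergeArrs (S : List Int) (E : List Int) (out : List (Int × Int)) : Prop := out = mergeArrs_alt S E
instance (S : List Int) (E : List Int) (out : List (Int × Int)) : Decidable (Spec_mergeArrs S E out) := by unfold Spec_mergeArrs; infer_instance

-- ===== CLAIM (what is proved, stated in full; the proofs are below) =====
def Claim_equal_mergeArrs : Prop := ∀ (S : List Int) (E : List Int), Dom_mergeArrs S E → Spec_mergeArrs S E (mergeArrs S E)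

-- ===== LEMMAS AND PROOFS =====

-- the comparator A's tuple-key sort uses is exactly `<` on the lexicographic key `toLex`
theorem cmp_eq_lex :
    (fun (a b : Int × Int) => decide (a.1 < b.1) || (!decide (b.1 < a.1) && decide (a.2 < b.2)))
      = (fun (a b : Int × Int) => decide ((toLex a : Lex (Int × Int)) < toLex b)) := by
  funext a b
  have hlex : ((toLex a : Lex (Int × Int)) < toLex b) ↔ a.1 < b.1 ∨ a.1 = b.1 ∧ a.2 < b.2 :=
    Prod.Lex.toLex_lt_toLex
  rw [Bool.eq_iff_iff]
  simp only [Bool.or_eq_true, Bool.and_eq_true, Bool.not_eq_true', decide_eq_true_eq,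
    decide_eq_false_iff_not, hlex]
  omega

-- hence A's `sorted2` on this list is `sorted` under the lex key
theorem sorted2_eq_sorted_toLex (xs : List (Int × Int)) :
    PySem.List.sorted2 xs (fun p => p.1) (fun p => p.2)
      = PySem.List.sorted xs (fun p => (toLex p : Lex (Int × Int))) := by
  rw [PySem.List.sorted_eq_foldl_insertBy]
  show List.foldl (fun acc x => PySem.List.insertBy _ x acc) [] xs = _
  rw [cmp_eq_lex]
  simp

theorem mergeTag_perm (ss ee : List Int) :
    (mergeTag ss ee).Perm (ss.map (fun v => (v, 1)) ++ ee.map (fun v => (v, 0))) := by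
  induction ss generalizing ee with
  | nil => cases ee <;> simp [mergeTag]
  | cons s ss ih =>
      induction ee with
      | nil => simp [mergeTag]
      | cons e ee ihe =>
          by_cases h : e ≤ s
          · simp only [mergeTag, if_pos h, List.map_cons]
            exact (ihe.cons _).trans List.perm_middle.symm
          · simp only [mergeTag, if_neg h, List.map_cons, List.cons_append]
            exact (ih (e :: ee)).cons _

theorem mem_mergeTag {ss ee : List Int} {x : Int × Int} (hx : x ∈ mergeTag ss ee) :
    (x.2 = 1 ∧ x.1 ∈ ss) ∨ (x.2 = 0 ∧ x.1 ∈ ee) := by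
  have := (mergeTag_perm ss ee).mem_iff.mp hx
  rcases List.mem_append.mp this with h | h <;>
    rcases List.mem_map.mp h with ⟨v, hv, rfl⟩
  · exact Or.inl ⟨rfl, hv⟩
  · exact Or.inr ⟨rfl, hv⟩

-- the merge output is ordered under the lexicographic key
theorem mergeTag_pairwise (ss ee : List Int)
    (hss : ss.Pairwise (· ≤ ·)) (hee : ee.Pairwise (· ≤ ·)) :
    (mergeTag ss ee).Pairwise
      (fun a b => (toLex a : Lex (Int × Int)) ≤ toLex b) := by
  induction ss generalizing ee with
  | nil =>
      cases ee with
      | nil => simp [mergeTag]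
      | cons e ee =>
          simp only [mergeTag]
          rw [List.pairwise_map]
          exact hee.imp (fun h => Prod.Lex.toLex_le_toLex.mpr (by omega))
  | cons s ss ih =>
      induction ee with
      | nil =>
          simp only [mergeTag]
          rw [List.pairwise_map]
          exact hss.imp (fun h => Prod.Lex.toLex_le_toLex.mpr (by omega))
      | cons e ee ihe =>
          have hss' : ss.Pairwise (· ≤ ·) := hss.tail
          have hee' : ee.Pairwise (· ≤ ·) := hee.tail
          have hsl : ∀ v ∈ ss, s ≤ v := fun v hv => List.rel_of_pairwise_cons hss hv
          have hel : ∀ v ∈ ee, e ≤ v := fun v hv => List.rel_of_pairwise_cons hee hv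
          by_cases h : e ≤ s
          · simp only [mergeTag, if_pos h]
            refine List.Pairwise.cons ?_ (ihe hee')
            intro y hy
            refine Prod.Lex.toLex_le_toLex.mpr ?_
            rcases mem_mergeTag hy with ⟨ht, hm⟩ | ⟨ht, hm⟩
            · have hy1 : s ≤ y.1 := by
                rcases List.mem_cons.mp hm with h' | h'
                · omega
                · exact hsl _ h'
              simp only
              omega
            · have hy1 : e ≤ y.1 := hel _ hm
              simp only
              omega
          · simp only [mergeTag, if_neg h]
            refine List.Pairwise.cons ?_ (ih (e :: ee) hss' hee)
            intro y hy
            refine Prod.Lex.toLex_le_toLex.mpr ?_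
            rcases mem_mergeTag hy with ⟨ht, hm⟩ | ⟨ht, hm⟩
            · have hy1 : s ≤ y.1 := hsl _ hm
              simp only
              omega
            · have hy1 : e ≤ y.1 := by
                rcases List.mem_cons.mp hm with h' | h'
                · omega
                · exact hel _ h'
              simp only
              omega

-- ===== VERDICT (by name: the statement is the Claim_ definition above) =====
theorem mergeArrs_spec : Claim_equal_mergeArrs := by
  intro S E _
  show mergeArrs S E = mergeArrs_alt S E
  unfold mergeArrs mergeArrs_alt
  simp only
  rw [PySem.List.foldl_append_singleton_eq_map, PySem.List.foldl_append_singleton_eq_map,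
      List.nil_append]
  rw [sorted2_eq_sorted_toLex]
  apply PySem.List.eq_of_perm_of_pairwise_le_of_injective
      (key := fun p : Int × Int => (toLex p : Lex (Int × Int)))
  · exact fun a b h => h
  · -- permutation
    refine (PySem.List.sorted_perm _ _ _).trans ?_
    refine List.Perm.symm ((mergeTag_perm _ _).trans ?_)
    exact List.Perm.append ((PySem.List.sorted_perm S _ _).map _)
      ((PySem.List.sorted_perm E _ _).map _)
  · exact PySem.List.sorted_pairwise _ _
  · exact mergeTag_pairwise _ _ (by simpa using PySem.List.sorted_pairwise S (fun x => x))
      (by simpa using PySem.List.sorted_pairwise E (fun x => x))
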